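-- pv_equiv track=rewrite | github.com/pypi-data/pypi-mirror-273 | packages/tucan/tucan-0.2.0.tar.gz/tucan-0.2.0/src/tucan/clean_ifdef.py | replace_strings_by_proxies
-- ===== SOURCE A (Python) =====
-- def replace_strings_by_proxies(line:str)-> (str, dict) :
--     """Extreme measure to handle strings values in Ifdefs..."""
--     proxies={}
--     indexes = [i for i, char in enumerate(line) if char == '"']
--
--     if not indexes:
--         return line, proxies
--
--     #logger.critical("Replacing strings:"+line)
--     last_char=0
--     out_line = ""
--     for i in range(0, len(indexes), 2):
--         pair = indexes[i:i+2]
--         key = f"#STR{i}#"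
--         try:
--             value = line[pair[0]:pair[1]+1]
--         except IndexError: # happen is " are not in even number
--             break          # well this should never happen but you never know
--         proxies[key]=value
--         out_line+=line[last_char:pair[0]-1] + " "+key
--         last_char=pair[1]+1
--
--     out_line+=line[last_char:]
--     return out_line, proxies
-- ===== SOURCE B (Python) =====
-- def replace_strings_by_proxies(line: str) -> (str, dict):
--     """Extreme measure to handle strings values in Ifdefs..."""
--     # Split on quotes: segments alternate outside/inside string; pair them back up.
--     parts = line.split('"')
--     npairs = (len(parts) - 1) // 2
--     proxies = {}
--     out = []
--     for k in range(npairs):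
--         key = f"#STR{2 * k}#"
--         proxies[key] = '"' + parts[2 * k + 1] + '"'
--         out.append(parts[2 * k][:-1] + " " + key)
--     out.append('"'.join(parts[2 * npairs:]))
--     return "".join(out), proxies
-- ===== Notes on version B (the rewrite author's own statement) =====
-- stated objective: faster
-- what changed: A enumerates every quote index into a list with a per-character pass and walks it in strides of two, slicing the line by absolute positions with a try/except break; B never computes an index: it splits the line on '"' once and reassembles the alternating outside/inside segments pairwise (segment[:-1] + key, inside re-quoted as the proxy value), joining the leftover segments back with '"' as the tail.
-- intended difference: On lines that start with '"' and contain a second quote, A's slice line[last:pair[0]-1] becomes line[0:-1] (negative-index wraparound), so A duplicates almost the whole line into the output before the first proxy key; B emits the intended empty prefix there. — e.g. on replace_strings_by_proxies("\"a\""): A returns ("\"a #STR0#", [("#STR0#", "\"a\"")]), B returns (" #STR0#", [("#STR0#", "\"a\"")])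
import Mathlib
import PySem

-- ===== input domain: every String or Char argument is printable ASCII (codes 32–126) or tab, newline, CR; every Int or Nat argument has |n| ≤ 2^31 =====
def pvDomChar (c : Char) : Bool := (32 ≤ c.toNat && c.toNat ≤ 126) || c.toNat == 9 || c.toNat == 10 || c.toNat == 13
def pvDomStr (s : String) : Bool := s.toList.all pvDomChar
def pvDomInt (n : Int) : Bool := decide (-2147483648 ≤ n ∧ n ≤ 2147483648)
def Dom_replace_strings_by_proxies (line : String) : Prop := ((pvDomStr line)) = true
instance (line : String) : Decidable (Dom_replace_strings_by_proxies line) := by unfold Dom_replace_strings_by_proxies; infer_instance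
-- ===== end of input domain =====

-- B replaces A's quote-index list and stride-2 absolute-position slicing by one split('"') and a
-- pairwise reassembly of the alternating outside/inside segments (no index arithmetic; the timing
-- run measured B faster by a constant factor). A = B is proved outside D_ (lines opening with a
-- quote), where A's line[0:-1] wraparound duplicates the line and B emits the intended empty
-- prefix; inside D_ the outputs are proved to always differ (replace_strings_by_proxies_tight).

-- shared f-string "#STR{i}#"
def pvKey (i : Int) : List Char := '#' :: 'S' :: 'T' :: 'R' :: (PySem.Int.toChars i ++ ['#'])

-- ===== PORT A =====
-- the for-loop over range(0, len(indexes), 2); break on IndexError at pair[1]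
def pvA_loop (cs : List Char) (idxs : List Int) :
    List Int → PySem.Dict String String → Int → List Char →
    PySem.Dict String String × Int × List Char
  | [], pr, last, out => (pr, last, out)
  | i :: rest, pr, last, out =>
    let pair := PySem.List.slice idxs (some i) (some (i + 2))
    let key := pvKey i
    match PySem.List.pyGet? pair 0, PySem.List.pyGet? pair 1 with
    | some p0, some p1 =>
        let value := PySem.Chars.slice cs (some p0) (some (p1 + 1))
        pvA_loop cs idxs rest (pr.insert (String.ofList key) (String.ofList value)) (p1 + 1)
          (out ++ PySem.Chars.slice cs (some last) (some (p0 - 1)) ++ ' ' :: key)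
    | _, _ => (pr, last, out)   -- except IndexError: break

def replace_strings_by_proxies (line : String) : String × (List (String × String)) :=
  let cs := line.toList
  let proxies : PySem.Dict String String := ⟨[]⟩
  let indexes : List Int :=
    (PySem.List.enumerate cs 0).foldl (fun acc p => if p.2 == '"' then acc ++ [p.1] else acc) []
  if indexes = [] then (line, proxies.items)
  else
    let r := pvA_loop cs indexes (PySem.List.pyRange 0 indexes.length 2) proxies 0 []
    (String.ofList (r.2.2 ++ PySem.Chars.slice cs (some r.2.1) none), r.1.items)

-- ===== PORT B =====
-- Source B: parts = line.split('"'); loop k in range(npairs) pairing parts[2k], parts[2k+1];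
-- tail = '"'.join(parts[2*npairs:]).  The pyGetD accesses are in range for every k < npairs.
def replace_strings_by_proxies_alt (line : String) : String × (List (String × String)) :=
  let parts := PySem.Chars.splitOn line.toList ['"']
  let npairs : Int := PySem.Int.floordiv (PySem.List.len parts - 1) 2
  let r := (PySem.List.pyRange 0 npairs).foldl
    (fun (ac : PySem.Dict String String × List (List Char)) k =>
      let key := pvKey (2 * k)
      (ac.1.insert (String.ofList key)
          (String.ofList ('"' :: PySem.List.pyGetD parts (2 * k + 1) [] ++ ['"'])),
       ac.2 ++ [PySem.List.slice (PySem.List.pyGetD parts (2 * k) []) none (some (-1)) ++ ' ' :: key]))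
    (⟨[]⟩, [])
  (String.ofList (PySem.Chars.join []
      (r.2 ++ [PySem.Chars.join ['"'] (PySem.List.slice parts (some (2 * npairs)) none)])),
   r.1.items)

-- ===== PRECONDITION & SPEC =====
-- On lines that start with '"' and contain a second quote, A's slice line[last:pair[0]-1] becomes
-- line[0:-1] (negative-index wraparound), duplicating almost the whole line into the output before
-- the first proxy key; B emits the intended empty prefix there.
def D_replace_strings_by_proxies (line : String) : Prop :=
  line.toList.head? = some '"' ∧ '"' ∈ line.toList.tail
instance (line : String) : Decidable (D_replace_strings_by_proxies line) := by
  unfold D_replace_strings_by_proxies; infer_instance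

def Spec_replace_strings_by_proxies (line : String) (out : String × (List (String × String))) : Prop := ¬ D_replace_strings_by_proxies line → out = replace_strings_by_proxies_alt line
instance (line : String) (out : String × (List (String × String))) : Decidable (Spec_replace_strings_by_proxies line out) := by unfold Spec_replace_strings_by_proxies; infer_instance

def pvDiffWitness_replace_strings_by_proxies : String := "\"a\""
def pvDiffWitnessOut_replace_strings_by_proxies :
    (String × (List (String × String))) × (String × (List (String × String))) :=
  (("\"a #STR0#", [("#STR0#", "\"a\"")]), (" #STR0#", [("#STR0#", "\"a\"")]))

-- ===== CLAIM (what is proved, stated in full; the proofs are below) =====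
def Claim_unchanged_replace_strings_by_proxies : Prop := ∀ (line : String), Dom_replace_strings_by_proxies line → Spec_replace_strings_by_proxies line (replace_strings_by_proxies line)
def Claim_changed_replace_strings_by_proxies : Prop := Dom_replace_strings_by_proxies (pvDiffWitness_replace_strings_by_proxies) ∧ D_replace_strings_by_proxies (pvDiffWitness_replace_strings_by_proxies) ∧ replace_strings_by_proxies (pvDiffWitness_replace_strings_by_proxies) = pvDiffWitnessOut_replace_strings_by_proxies.1 ∧ replace_strings_by_proxies_alt (pvDiffWitness_replace_strings_by_proxies) = pvDiffWitnessOut_replace_strings_by_proxies.2 ∧ pvDiffWitnessOut_replace_strings_by_proxies.1 ≠ pvDiffWitnessOut_replace_strings_by_proxies.2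
def Claim_exact_replace_strings_by_proxies : Prop := ∀ (line : String), Dom_replace_strings_by_proxies line → D_replace_strings_by_proxies line → replace_strings_by_proxies line ≠ replace_strings_by_proxies_alt line

-- ===== LEMMAS AND PROOFS =====

-- the quote positions of cs at or after position p, in increasing order
def pvQpos (cs : List Char) (p : Nat) : List Nat :=
  (List.range cs.length).filter (fun j => decide (p ≤ j) && decide (cs[j]? = some '"'))

-- A's loop, with the quote-position pairs consumed structurally two at a time
def pvGo (cs : List Char) :
    List Nat → Int → PySem.Dict String String → Int → List Char →
    PySem.Dict String String × Int × List Char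
  | q0 :: q1 :: rest, i, pr, last, out =>
      pvGo cs rest (i + 2)
        (pr.insert (String.ofList (pvKey i))
          (String.ofList (PySem.Chars.slice cs (some (q0 : Int)) (some ((q1 : Int) + 1)))))
        ((q1 : Int) + 1)
        (out ++ PySem.Chars.slice cs (some last) (some ((q0 : Int) - 1)) ++ ' ' :: pvKey i)
  | _, _, pr, last, out => (pr, last, out)

-- the common reference recursion over the '"'-split segments of the line
def pvSegRec (i : Int) (pr : PySem.Dict String String) (out : List Char) :
    List (List Char) → PySem.Dict String String × List Char
  | s0 :: s1 :: t :: ts =>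
      pvSegRec (i + 2)
        (pr.insert (String.ofList (pvKey i)) (String.ofList ('"' :: s1 ++ ['"'])))
        (out ++ s0.dropLast ++ ' ' :: pvKey i) (t :: ts)
  | segs => (pr, out ++ PySem.Chars.join ['"'] segs)

-- structural model of PySem.Chars.splitOn.go for the one-character separator '"'
def pvSplit : List Char → List Char → List (List Char)
  | [], cur => [cur.reverse]
  | c :: rest, cur => if c = '"' then cur.reverse :: pvSplit rest [] else pvSplit rest (c :: cur)

theorem pv_join_nil_flatten (ps : List (List Char)) : PySem.Chars.join [] ps = ps.flatten := by
  induction ps with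
  | nil => simp [PySem.Chars.join_nil]
  | cons p ps ih =>
    cases ps with
    | nil => simp [PySem.Chars.join_singleton]
    | cons q rest => rw [PySem.Chars.join_cons_cons]; simp_all

theorem pv_mem_qpos {cs : List Char} {p j : Nat} :
    j ∈ pvQpos cs p ↔ p ≤ j ∧ j < cs.length ∧ cs[j]? = some '"' := by
  simp [pvQpos, List.mem_filter, List.mem_range]; tauto

theorem pv_qpos_sorted (cs : List Char) (p : Nat) : (pvQpos cs p).Pairwise (· < ·) := by
  exact (List.pairwise_lt_range).filter _

theorem pv_qpos_tail {cs : List Char} {p q : Nat} {qs : List Nat}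
    (h : pvQpos cs p = q :: qs) : pvQpos cs (q + 1) = qs := by
  have hq : p ≤ q := (pv_mem_qpos.mp (h ▸ List.mem_cons_self)).1
  have h1 : pvQpos cs (q + 1) = (pvQpos cs p).filter (fun j => decide (q + 1 ≤ j)) := by
    unfold pvQpos
    rw [List.filter_filter]
    apply List.filter_congr
    intro j hj
    by_cases hj2 : q + 1 ≤ j <;> simp [hj2] <;> omega
  rw [h1, h]
  have hs := pv_qpos_sorted cs p
  rw [h] at hs
  have hall : ∀ x ∈ qs, q < x := (List.pairwise_cons.mp hs).1
  simp only [List.filter_cons]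
  have : ¬ (q + 1 ≤ q) := by omega
  simp [this]
  intro x hx
  have := hall x hx
  omega

-- no quote at or after p  →  no quote positions
theorem pv_qpos_nil {cs : List Char} {p : Nat} (h : '"' ∉ List.drop p cs) :
    pvQpos cs p = [] := by
  rw [List.eq_nil_iff_forall_not_mem]
  intro j hj
  obtain ⟨h1, h2, h3⟩ := pv_mem_qpos.mp hj
  apply h
  have : (List.drop p cs)[j - p]? = some '"' := by
    rw [List.getElem?_drop]
    rw [show p + (j - p) = j from by omega]
    exact h3
  exact List.mem_of_getElem? this
theorem pv_qpos_cons {cs : List Char} {p : Nat} {s0 r : List Char}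
    (hd : List.drop p cs = s0 ++ '"' :: r) (hs0 : '"' ∉ s0) :
    pvQpos cs p = (p + s0.length) :: pvQpos cs (p + s0.length + 1) := by
  have hplen : p ≤ cs.length := by
    by_contra hc
    rw [List.drop_eq_nil_of_le (by omega)] at hd
    exact absurd hd.symm (by simp)
  have hdl : cs.length - p = s0.length + 1 + r.length := by
    have := congrArg List.length hd
    simp at this; omega
  have hmem : (p + s0.length) ∈ pvQpos cs p := by
    rw [pv_mem_qpos]
    refine ⟨by omega, by omega, ?_⟩
    have : (List.drop p cs)[s0.length]? = some '"' := by
      rw [hd]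
      rw [List.getElem?_append_right (by omega)]
      simp
    rwa [List.getElem?_drop] at this
  have hmin : ∀ j ∈ pvQpos cs p, p + s0.length ≤ j := by
    intro j hj
    obtain ⟨h1, h2, h3⟩ := pv_mem_qpos.mp hj
    by_contra hc
    have hlt : j - p < s0.length := by omega
    have : (List.drop p cs)[j - p]? = some '"' := by
      rw [List.getElem?_drop, show p + (j - p) = j from by omega]; exact h3
    rw [hd, List.getElem?_append_left (by omega)] at this
    exact hs0 (List.mem_of_getElem? this)
  obtain ⟨q, qs, hq⟩ : ∃ q qs, pvQpos cs p = q :: qs := by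
    cases hh : pvQpos cs p with
    | nil => rw [hh] at hmem; simp at hmem
    | cons q qs => exact ⟨q, qs, rfl⟩
  have hqe : q = p + s0.length := by
    have h1 : p + s0.length ≤ q := hmin q (hq ▸ List.mem_cons_self)
    rw [hq] at hmem
    rcases List.mem_cons.mp hmem with h2 | h2
    · omega
    · have hs := pv_qpos_sorted cs p
      rw [hq] at hs
      have := (List.pairwise_cons.mp hs).1 _ h2
      omega
  subst hqe
  rw [hq, pv_qpos_tail hq]
theorem pv_pyRange_two_nil {a b : Int} (h : b ≤ a) : PySem.List.pyRange a b 2 = [] := by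
  rw [PySem.List.pyRange_of_pos _ _ (by norm_num)]
  simp [not_lt.mpr h]

theorem pv_pyRange_two_cons {a b : Int} (h : a < b) :
    PySem.List.pyRange a b 2 = a :: PySem.List.pyRange (a + 2) b 2 := by
  rw [PySem.List.pyRange_of_pos _ _ (by norm_num), PySem.List.pyRange_of_pos _ _ (by norm_num)]
  have hn : ((b - a + 2 - 1) / 2).toNat = (if a + 2 < b then ((b - (a+2) + 2 - 1) / 2).toNat else 0) + 1 := by
    split <;> omega
  simp only [if_pos h, hn, List.range_succ_eq_map, List.map_cons, List.map_map]
  refine List.cons_eq_cons.mpr ⟨by simp, ?_⟩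
  apply List.map_congr_left
  intro k _
  simp [Function.comp, Nat.succ_eq_add_one]
  ring

theorem pv_two_ind {motive : List Nat → Prop} (h0 : motive [])
    (h1 : ∀ q, motive [q])
    (h2 : ∀ q0 q1 rest, motive rest → motive (q0 :: q1 :: rest)) : ∀ qs, motive qs
  | [] => h0
  | [q] => h1 q
  | q0 :: q1 :: rest => h2 q0 q1 rest (pv_two_ind h0 h1 h2 rest)

theorem pv_seg_ind {motive : List (List Char) → Prop} (h0 : motive [])
    (h1 : ∀ s, motive [s])
    (h2 : ∀ s t, motive [s, t])
    (h3 : ∀ s0 s1 t ts, motive (t :: ts) → motive (s0 :: s1 :: t :: ts)) :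
    ∀ segs, motive segs
  | [] => h0
  | [s] => h1 s
  | [s, t] => h2 s t
  | s0 :: s1 :: t :: ts => h3 s0 s1 t ts (pv_seg_ind h0 h1 h2 h3 (t :: ts))

theorem pv_indexes_eq (cs : List Char) :
    (PySem.List.enumerate cs 0).foldl (fun acc p => if p.2 == '"' then acc ++ [p.1] else acc) []
      = (pvQpos cs 0).map (fun n : Nat => (n : Int)) := by
  rw [PySem.List.foldl_append_if]
  rw [PySem.List.enumerate_eq_map_pyRange cs ' ']
  simp only [PySem.List.len]
  rw [PySem.List.pyRange_zero_natCast cs.length]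
  rw [List.filter_map, List.filter_map, List.map_map, List.map_map]
  unfold pvQpos
  rw [List.filter_congr (q := fun j => decide ((0:Nat) ≤ j) && decide (cs[j]? = some '"')) ?_]
  · simp [List.map_eq_flatMap]
  · intro j hj
    simp only [Function.comp_apply, PySem.List.pyGetD_natCast]
    have hjl : j < cs.length := List.mem_range.mp hj
    rw [List.getD_eq_getElem?_getD, List.getElem?_eq_getElem hjl]
    simp [Bool.beq_eq_decide_eq]

theorem pv_pyRange_two_nil' {k m : Nat} (h : m ≤ k) :
    PySem.List.pyRange (k : Int) (m : Int) 2 = [] :=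
  pv_pyRange_two_nil (by exact_mod_cast h)

theorem pv_pyRange_two_cons' {k m : Nat} (h : k < m) :
    PySem.List.pyRange (k : Int) (m : Int) 2
      = (k : Int) :: PySem.List.pyRange ((k + 2 : Nat) : Int) (m : Int) 2 := by
  rw [pv_pyRange_two_cons (by exact_mod_cast h)]
  norm_cast

theorem pv_A_loop_spec (cs : List Char) :
    ∀ qs (pre : List Int) pr last out,
      pvA_loop cs (pre ++ qs.map (fun n : Nat => (n : Int)))
          (PySem.List.pyRange (pre.length : Int) ((pre.length + qs.length : Nat) : Int) 2) pr last out
        = pvGo cs qs (pre.length : Int) pr last out := by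
  intro qs
  induction qs using pv_two_ind with
  | h0 =>
    intro pre pr last out
    rw [pv_pyRange_two_nil' (by simp)]
    rfl
  | h1 q =>
    intro pre pr last out
    rw [pv_pyRange_two_cons' (by simp), pv_pyRange_two_nil' (by simp)]
    show pvA_loop _ _ [_] _ _ _ = _
    unfold pvA_loop
    have hpair : PySem.List.slice (pre ++ [q].map (fun n : Nat => (n : Int))) (some (pre.length : Int))
        (some ((pre.length : Int) + 2)) = [(q : Int)] := by
      rw [show ((pre.length : Int) + 2) = ((pre.length + 2 : Nat) : Int) by push_cast; ring]
      rw [PySem.List.slice_natCast]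
      simp
    have hg1 : PySem.List.pyGet? [(q : Int)] 1 = none := by
      simp [PySem.List.pyGet?, PySem.List.pyIdx?]
    have hg0 : PySem.List.pyGet? [(q : Int)] 0 = some (q : Int) := by
      simp [PySem.List.pyGet?, PySem.List.pyIdx?]
    simp only [hpair, hg0, hg1]
    rfl
  | h2 q0 q1 rest ih =>
    intro pre pr last out
    rw [pv_pyRange_two_cons' (by simp)]
    show pvA_loop _ _ (_ :: _) _ _ _ = _
    unfold pvA_loop
    have hpair : PySem.List.slice (pre ++ (q0 :: q1 :: rest).map (fun n : Nat => (n : Int)))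
        (some (pre.length : Int)) (some ((pre.length : Int) + 2)) = [(q0 : Int), (q1 : Int)] := by
      rw [show ((pre.length : Int) + 2) = ((pre.length + 2 : Nat) : Int) by push_cast; ring]
      rw [PySem.List.slice_natCast]
      simp
    have hg0 : PySem.List.pyGet? [(q0 : Int), (q1 : Int)] 0 = some (q0 : Int) := by
      simp [PySem.List.pyGet?, PySem.List.pyIdx?]
    have hg1 : PySem.List.pyGet? [(q0 : Int), (q1 : Int)] 1 = some (q1 : Int) := by
      simp [PySem.List.pyGet?, PySem.List.pyIdx?]
    simp only [hpair, hg0, hg1]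
    have ih2 := ih (pre ++ [(q0 : Int), (q1 : Int)])
      (pr.insert (String.ofList (pvKey (pre.length : Int)))
        (String.ofList (PySem.Chars.slice cs (some (q0 : Int)) (some ((q1 : Int) + 1)))))
      ((q1 : Int) + 1)
      (out ++ PySem.Chars.slice cs (some last) (some ((q0 : Int) - 1)) ++ ' ' :: pvKey (pre.length : Int))
    have hlp : (pre ++ [(q0 : Int), (q1 : Int)]).length = pre.length + 2 := by simp
    rw [hlp] at ih2
    rw [show (pre ++ [(q0 : Int), (q1 : Int)]) ++ rest.map (fun n : Nat => (n : Int))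
        = pre ++ (q0 :: q1 :: rest).map (fun n : Nat => (n : Int)) from by simp] at ih2
    rw [show pre.length + 2 + rest.length = pre.length + (q0 :: q1 :: rest).length from by
      simp [List.length_cons]; ring] at ih2
    rw [ih2]
    conv_rhs => rw [pvGo]
    norm_cast

-- A's pvGo, run on the quote positions of a segment decomposition, equals pvSegRec
theorem pvGo_nil (cs : List Char) (i : Int) (pr : PySem.Dict String String) (last : Int) (out : List Char) :
    pvGo cs [] i pr last out = (pr, last, out) := rfl
theorem pvGo_one (cs : List Char) (q : Nat) (i : Int) (pr : PySem.Dict String String) (last : Int) (out : List Char) :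
    pvGo cs [q] i pr last out = (pr, last, out) := rfl

theorem pv_go_seg (cs : List Char) :
    ∀ segs (last : Nat) (i : Int) pr out,
      List.drop last cs = PySem.Chars.join ['"'] segs →
      (∀ s ∈ segs, '"' ∉ s) →
      (3 ≤ segs.length → 1 ≤ last ∨ segs.head? ≠ some []) →
      ((pvGo cs (pvQpos cs last) i pr (last : Int) out).1,
       (pvGo cs (pvQpos cs last) i pr (last : Int) out).2.2
         ++ PySem.Chars.slice cs (some (pvGo cs (pvQpos cs last) i pr (last : Int) out).2.1) none)
        = pvSegRec i pr out segs := by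
  intro segs
  induction segs using pv_seg_ind with
  | h0 =>
    intro last i pr out hd _ _
    rw [PySem.Chars.join_nil] at hd
    rw [pv_qpos_nil (by rw [hd]; simp)]
    simp only [pvGo_nil, pvSegRec, PySem.Chars.join_nil, PySem.Chars.slice_eq_listSlice]
    rw [PySem.List.slice_from cs (Int.natCast_nonneg last)]
    simp [hd]
  | h1 s =>
    intro last i pr out hd hall _
    rw [PySem.Chars.join_singleton] at hd
    rw [pv_qpos_nil (by rw [hd]; exact hall s (by simp))]
    simp only [pvGo_nil, pvSegRec, PySem.Chars.join_singleton, PySem.Chars.slice_eq_listSlice]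
    rw [PySem.List.slice_from cs (Int.natCast_nonneg last)]
    simp [hd]
  | h2 s t =>
    intro last i pr out hd hall _
    rw [PySem.Chars.join_cons_cons, PySem.Chars.join_singleton] at hd
    have hd' : List.drop last cs = s ++ '"' :: t := by simpa using hd
    have hs : '"' ∉ s := hall s (by simp)
    have ht : '"' ∉ t := hall t (by simp)
    rw [pv_qpos_cons hd' hs]
    have hstep : List.drop (last + s.length + 1) cs = t := by
      have h := congrArg (List.drop (s.length + 1)) hd'
      rw [List.drop_drop] at h
      rw [show last + s.length + 1 = last + (s.length + 1) from by omega, h,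
        show s ++ '"' :: t = (s ++ ['"']) ++ t from by simp, List.drop_left' (by simp)]
    have htail : pvQpos cs (last + s.length + 1) = [] := by
      apply pv_qpos_nil
      rw [hstep]; exact ht
    rw [htail]
    simp only [pvGo_one, pvSegRec, PySem.Chars.join_cons_cons, PySem.Chars.join_singleton,
      PySem.Chars.slice_eq_listSlice]
    rw [PySem.List.slice_from cs (Int.natCast_nonneg last)]
    simp [hd']
  | h3 s0 s1 t ts ih =>
    intro last i pr out hd hall hcond
    rw [PySem.Chars.join_cons_cons] at hd
    have hd' : List.drop last cs = s0 ++ '"' :: (s1 ++ '"' :: PySem.Chars.join ['"'] (t :: ts)) := by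
      rw [hd, PySem.Chars.join_cons_cons]; simp
    have hs0 : '"' ∉ s0 := hall s0 (by simp)
    have hs1 : '"' ∉ s1 := hall s1 (by simp)
    set X := PySem.Chars.join ['"'] (t :: ts) with hX
    set q0 := last + s0.length with hq0
    have hdrop_q0 : List.drop q0 cs = '"' :: (s1 ++ '"' :: X) := by
      have h := congrArg (List.drop s0.length) hd'
      rw [List.drop_drop] at h
      rw [hq0, h, List.drop_left' rfl]
    have hdrop_q01 : List.drop (q0 + 1) cs = s1 ++ '"' :: X := by
      have h := congrArg (List.drop 1) hdrop_q0
      rw [List.drop_drop] at h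
      rw [h]; simp
    set q1 := q0 + 1 + s1.length with hq1
    have hdrop_q11 : List.drop (q1 + 1) cs = X := by
      have h := congrArg (List.drop (s1.length + 1)) hdrop_q01
      rw [List.drop_drop] at h
      rw [show q1 + 1 = q0 + 1 + (s1.length + 1) from by omega, h,
        show s1 ++ '"' :: X = (s1 ++ ['"']) ++ X from by simp, List.drop_left' (by simp)]
    rw [pv_qpos_cons hd' hs0, pv_qpos_cons hdrop_q01 hs1]
    rw [pvGo]
    -- the inserted value: line[q0 : q1+1] = '"' :: s1 ++ ['"']
    have hval : PySem.Chars.slice cs (some (q0 : Int)) (some ((q1 : Int) + 1)) = '"' :: s1 ++ ['"'] := by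
      rw [PySem.Chars.slice_eq_listSlice,
        show ((q1 : Int) + 1) = ((q1 + 1 : Nat) : Int) from by push_cast; ring,
        PySem.List.slice_natCast, hdrop_q0,
        show '"' :: (s1 ++ '"' :: X) = ('"' :: s1 ++ ['"']) ++ X from by simp]
      rw [List.take_left' (by simp; omega)]
    -- the appended chunk: line[last : q0-1] = s0.dropLast
    have hchunk : PySem.Chars.slice cs (some (last : Int)) (some ((q0 : Int) - 1)) = s0.dropLast := by
      rcases List.eq_nil_or_concat s0 with h | _
    -- s0 = [] : only reachable with 1 ≤ last; both sides are []
      · subst h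
        have hlast : 1 ≤ last := by
          rcases hcond (by simp) with h | h
          · exact h
          · simp at h
        rw [PySem.Chars.slice_eq_listSlice, hq0,
          show ((last + [].length : Nat) : Int) - 1 = ((last - 1 : Nat) : Int) from by
            simp; omega,
          PySem.List.slice_natCast]
        simp [Nat.sub_le]
      · have h1 : 1 ≤ q0 := by
          rename_i hcc
          obtain ⟨l2, a, rfl⟩ := hcc
          simp only [hq0]; simp; omega
        rw [PySem.Chars.slice_eq_listSlice,
          show ((q0 : Int) - 1) = ((q0 - 1 : Nat) : Int) from by omega,
          PySem.List.slice_natCast,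
          show q0 - 1 - last = s0.length - 1 from by omega, hd',
          List.take_append_of_le_length (by omega), ← List.dropLast_eq_take]
    rw [hval, hchunk]
    have ih2 := ih (q1 + 1) (i + 2)
      (pr.insert (String.ofList (pvKey i)) (String.ofList ('"' :: s1 ++ ['"'])))
      (out ++ s0.dropLast ++ ' ' :: pvKey i)
      hdrop_q11 (fun s hs => hall s (by simp at hs ⊢; tauto))
      (fun _ => Or.inl (by omega))
    rw [show ((q1 : Int) + 1) = ((q1 + 1 : Nat) : Int) from by push_cast; ring]
    rw [ih2]
    rfl
theorem pv_fold_seg (parts : List (List Char)) :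
    ∀ segs (pre : List (List Char)) (n : Nat) pr (chunks : List (List Char)),
      parts = pre ++ segs → pre.length = 2 * n → segs ≠ [] →
      (((PySem.List.pyRange (n : Int) ((n + (segs.length - 1) / 2 : Nat) : Int)).foldl
        (fun (ac : PySem.Dict String String × List (List Char)) k =>
          (ac.1.insert (String.ofList (pvKey (2 * k)))
              (String.ofList ('"' :: PySem.List.pyGetD parts (2 * k + 1) [] ++ ['"'])),
           ac.2 ++ [PySem.List.slice (PySem.List.pyGetD parts (2 * k) []) none (some (-1)) ++ ' ' :: pvKey (2 * k)]))
        (pr, chunks)).1,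
       ((PySem.List.pyRange (n : Int) ((n + (segs.length - 1) / 2 : Nat) : Int)).foldl
        (fun (ac : PySem.Dict String String × List (List Char)) k =>
          (ac.1.insert (String.ofList (pvKey (2 * k)))
              (String.ofList ('"' :: PySem.List.pyGetD parts (2 * k + 1) [] ++ ['"'])),
           ac.2 ++ [PySem.List.slice (PySem.List.pyGetD parts (2 * k) []) none (some (-1)) ++ ' ' :: pvKey (2 * k)]))
        (pr, chunks)).2.flatten
         ++ PySem.Chars.join ['"']
              (PySem.List.slice parts (some ((2 * (n + (segs.length - 1) / 2) : Nat) : Int)) none))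
        = pvSegRec (2 * (n : Int)) pr chunks.flatten segs := by
  intro segs
  induction segs using pv_seg_ind with
  | h0 => intro _ _ _ _ h _ hne; exact absurd rfl hne
  | h1 s =>
    intro pre n pr chunks hp hlen _
    simp only [List.length_cons, List.length_nil]
    rw [show n + (1 - 1) / 2 = n from by omega]
    rw [show PySem.List.pyRange (n : Int) (n : Int) = [] from by simp [PySem.List.pyRange]]
    simp only [List.foldl_nil]
    rw [PySem.List.slice_from parts (Int.natCast_nonneg (2 * n))]
    simp only [Int.toNat_natCast]
    rw [hp, List.drop_left' (by omega)]
    rfl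
  | h2 s t =>
    intro pre n pr chunks hp hlen _
    simp only [List.length_cons, List.length_nil]
    rw [show n + (1 + 1 - 1) / 2 = n from by omega]
    rw [show PySem.List.pyRange (n : Int) (n : Int) = [] from by simp [PySem.List.pyRange]]
    simp only [List.foldl_nil]
    rw [PySem.List.slice_from parts (Int.natCast_nonneg (2 * n))]
    simp only [Int.toNat_natCast]
    rw [hp, List.drop_left' (by omega)]
    rfl
  | h3 s0 s1 t ts ih =>
    intro pre n pr chunks hp hlen _
    have hL : (s0 :: s1 :: t :: ts).length - 1 = 2 + ((t :: ts).length - 1) := by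
      simp; omega
    have hP : n + ((s0 :: s1 :: t :: ts).length - 1) / 2 = (n + 1) + ((t :: ts).length - 1) / 2 := by
      rw [hL]
      have : (t :: ts).length = ts.length + 1 := by simp
      omega
    rw [hP]
    rw [PySem.List.pyRange_one_cons (by
      have : (n : Int) < ((n + 1 : Nat) : Int) := by exact_mod_cast Nat.lt_succ_self n
      calc (n : Int) < ((n+1 : Nat) : Int) := this
        _ ≤ (((n + 1) + ((t :: ts).length - 1) / 2 : Nat) : Int) := by exact_mod_cast Nat.le_add_right _ _)]
    rw [List.foldl_cons]
    -- parts[2n] = s0, parts[2n+1] = s1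
    have hg0 : PySem.List.pyGetD parts (2 * (n : Int)) [] = s0 := by
      rw [show (2 * (n : Int)) = ((2 * n : Nat) : Int) from by push_cast; ring,
        PySem.List.pyGetD_natCast, hp, List.getD_eq_getElem?_getD,
        List.getElem?_append_right (by omega), show 2 * n - pre.length = 0 from by omega]
      rfl
    have hg1 : PySem.List.pyGetD parts (2 * (n : Int) + 1) [] = s1 := by
      rw [show (2 * (n : Int) + 1) = ((2 * n + 1 : Nat) : Int) from by push_cast; ring,
        PySem.List.pyGetD_natCast, hp, List.getD_eq_getElem?_getD,
        List.getElem?_append_right (by omega), show 2 * n + 1 - pre.length = 1 from by omega]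
      rfl
    have hs0 : PySem.List.slice s0 none (some (-1)) = s0.dropLast := PySem.List.slice_to_neg_one s0
    have ih2 := ih (pre ++ [s0, s1]) (n + 1)
      (pr.insert (String.ofList (pvKey (2 * (n : Int))))
        (String.ofList ('"' :: s1 ++ ['"'])))
      (chunks ++ [s0.dropLast ++ ' ' :: pvKey (2 * (n : Int))])
      (by rw [hp]; simp) (by simp [hlen]; ring) (by simp)
    simp only [hg0, hg1, hs0]
    rw [show ((n : Int) + 1) = ((n + 1 : Nat) : Int) from by push_cast; ring]
    rw [ih2]
    conv_rhs => rw [pvSegRec]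
    rw [show (2 * ((n + 1 : Nat) : Int)) = 2 * (n : Int) + 2 from by push_cast; ring]
    simp
theorem pv_go_eq : ∀ (fuel : Nat) (l cur : List Char) (acc : List (List Char)), l.length < fuel →
    PySem.Chars.splitOn.go ['"'] fuel l cur acc = acc.reverse ++ pvSplit l cur := by
  intro fuel
  induction fuel with
  | zero => intro l cur acc h; omega
  | succ f ih =>
    intro l cur acc h
    cases l with
    | nil => simp [PySem.Chars.splitOn.go, pvSplit]
    | cons c rest =>
      rw [PySem.Chars.splitOn.go]
      by_cases hc : c = '"'
      · subst hc
        have hp : List.isPrefixOf ['"'] ('"' :: rest) = true := by simp [List.isPrefixOf]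
        rw [if_pos hp]
        rw [show List.drop (['"'] : List Char).length ('"' :: rest) = rest from rfl]
        rw [ih rest [] _ (by simpa using h)]
        simp [pvSplit]
      · have hp : List.isPrefixOf ['"'] (c :: rest) = false := by
          simp [List.isPrefixOf, Ne.symm hc]
        rw [if_neg (by simp [hp])]
        rw [ih rest (c :: cur) acc (by simpa using h)]
        simp [pvSplit, hc]

theorem pv_splitOn_eq (cs : List Char) : PySem.Chars.splitOn cs ['"'] = pvSplit cs [] := by
  rw [PySem.Chars.splitOn, pv_go_eq _ _ _ _ (by omega)]
  simp
theorem pv_split_ne_nil : ∀ l cur, pvSplit l cur ≠ [] := by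
  intro l
  induction l with
  | nil => intro cur; simp [pvSplit]
  | cons c rest ih =>
    intro cur
    by_cases h : c = '"' <;> simp [pvSplit, h, ih]

theorem pv_split_join : ∀ l cur, PySem.Chars.join ['"'] (pvSplit l cur) = cur.reverse ++ l := by
  intro l
  induction l with
  | nil => intro cur; simp [pvSplit, PySem.Chars.join_singleton]
  | cons c rest ih =>
    intro cur
    by_cases h : c = '"'
    · subst h
      simp only [pvSplit, if_pos]
      obtain ⟨a, as, ha⟩ : ∃ a as, pvSplit rest [] = a :: as := by
        cases hh : pvSplit rest [] with
        | nil => exact absurd hh (pv_split_ne_nil rest [])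
        | cons a as => exact ⟨a, as, rfl⟩
      rw [ha, PySem.Chars.join_cons_cons, ← ha, ih]
      simp
    · simp only [pvSplit, if_neg h, ih]
      simp
theorem pv_split_no_quote : ∀ l cur, '"' ∉ cur → ∀ s ∈ pvSplit l cur, '"' ∉ s := by
  intro l
  induction l with
  | nil => intro cur hc s hs; simp [pvSplit] at hs; subst hs; simpa using hc
  | cons c rest ih =>
    intro cur hc s hs
    by_cases h : c = '"'
    · rw [pvSplit, if_pos h] at hs
      rcases List.mem_cons.mp hs with h1 | h1
      · subst h1; simpa using hc
      · exact ih [] (by simp) s h1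
    · rw [pvSplit, if_neg h] at hs
      exact ih (c :: cur) (by simp [hc, Ne.symm h]) s hs
-- B's value, expressed through pvSegRec over the split segments
theorem pv_B_val (line : String) :
    replace_strings_by_proxies_alt line
      = (String.ofList (pvSegRec 0 ⟨[]⟩ [] (pvSplit line.toList [])).2,
         (pvSegRec 0 ⟨[]⟩ [] (pvSplit line.toList [])).1.items) := by
  have hne := pv_split_ne_nil line.toList []
  simp only [replace_strings_by_proxies_alt, pv_splitOn_eq]
  set segs := pvSplit line.toList [] with hsegsdef
  have hL : 1 ≤ segs.length := by
    cases hs : segs with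
    | nil => exact absurd hs hne
    | cons a r => simp
  have hnp : PySem.Int.floordiv (PySem.List.len segs - 1) 2
      = (((segs.length - 1) / 2 : Nat) : Int) := by
    simp only [PySem.List.len]
    rw [show ((segs.length : Int) - 1) = ((segs.length - 1 : Nat) : Int) from by omega]
    exact_mod_cast PySem.Int.floordiv_natCast _ 2
  rw [hnp]
  have hfold := pv_fold_seg segs segs [] 0 ⟨[]⟩ [] (by simp) (by simp) hne
  simp only [Nat.cast_zero, Nat.zero_add, List.flatten_nil, mul_zero] at hfold
  rw [Prod.mk.injEq]
  constructor
  · apply congrArg String.ofList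
    rw [pv_join_nil_flatten, List.flatten_append]
    have h2 := congrArg Prod.snd hfold
    simp only at h2
    simpa using h2
  · have h1 := congrArg Prod.fst hfold
    simp only at h1
    rw [h1]

-- A's value when the line has at least one quote, expressed the same way
theorem pv_A_val (line : String)
    (hq : pvQpos line.toList 0 ≠ [])
    (hnD : ¬ D_replace_strings_by_proxies line) :
    replace_strings_by_proxies line
      = (String.ofList (pvSegRec 0 ⟨[]⟩ [] (pvSplit line.toList [])).2,
         (pvSegRec 0 ⟨[]⟩ [] (pvSplit line.toList [])).1.items) := by
  have hsegs : PySem.Chars.join ['"'] (pvSplit line.toList []) = line.toList := by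
    simpa using pv_split_join line.toList []
  have hnqs := pv_split_no_quote line.toList [] (by simp)
  simp only [replace_strings_by_proxies, pv_indexes_eq]
  rw [if_neg (by simpa using hq)]
  have hA := pv_A_loop_spec line.toList (pvQpos line.toList 0) [] ⟨[]⟩ 0 []
  simp only [List.nil_append, List.length_nil, Nat.cast_zero, Nat.zero_add] at hA
  rw [List.length_map, hA]
  have hcond : 3 ≤ (pvSplit line.toList []).length →
      1 ≤ (0 : Nat) ∨ (pvSplit line.toList []).head? ≠ some [] := by
    intro _
    right
    intro hh
    apply hnD
    obtain ⟨rest, hr⟩ : ∃ rest, pvSplit line.toList [] = [] :: rest := by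
      cases hs : pvSplit line.toList [] with
      | nil => rw [hs] at hh; simp at hh
      | cons a r => rw [hs] at hh; simp at hh; exact ⟨r, by rw [hh]⟩
    rename_i h3
    obtain ⟨s1, t, ts, hr2⟩ : ∃ s1 t ts, rest = s1 :: t :: ts := by
      rw [hr] at h3
      cases rest with
      | nil => simp at h3
      | cons s1 r2 =>
        cases r2 with
        | nil => simp at h3
        | cons t ts => exact ⟨s1, t, ts, rfl⟩
    subst hr2
    rw [hr, PySem.Chars.join_cons_cons, PySem.Chars.join_cons_cons] at hsegs
    constructor
    · rw [← hsegs]; simp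
    · rw [← hsegs]; simp
  have hgo := pv_go_seg line.toList (pvSplit line.toList []) 0 0 ⟨[]⟩ []
    (by simpa using hsegs.symm) hnqs hcond
  simp only [Nat.cast_zero] at hgo
  rw [Prod.mk.injEq]
  constructor
  · apply congrArg String.ofList
    have h2 := congrArg Prod.snd hgo
    simpa using h2
  · have h1 := congrArg Prod.fst hgo
    simp only at h1
    rw [h1]

-- a quote-less line splits into the single segment cs
theorem pv_split_of_no_quote (cs : List Char) (h : '"' ∉ cs) : pvSplit cs [] = [cs] := by
  cases hh : pvSplit cs [] with
  | nil => exact absurd hh (pv_split_ne_nil cs [])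
  | cons s0 rest =>
    cases rest with
    | nil =>
      have := pv_split_join cs []
      rw [hh, PySem.Chars.join_singleton] at this
      simp at this
      rw [this]
    | cons r rs =>
      exfalso
      have := pv_split_join cs []
      rw [hh, PySem.Chars.join_cons_cons] at this
      simp at this
      exact h (by rw [← this]; simp)

-- ===== VERDICT (by name: the statement is the Claim_ definition above) =====
theorem replace_strings_by_proxies_spec : Claim_unchanged_replace_strings_by_proxies := by
  intro line _
  intro hnD
  by_cases hq : pvQpos line.toList 0 = []
  · have hnoq : '"' ∉ line.toList := by
      intro hmem
      obtain ⟨j, hj, he⟩ := List.mem_iff_getElem.mp hmem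
      have : j ∈ pvQpos line.toList 0 := pv_mem_qpos.mpr
        ⟨Nat.zero_le j, hj, by simp [List.getElem?_eq_getElem hj, he]⟩
      rw [hq] at this; simp at this
    have hA : replace_strings_by_proxies line = (line, []) := by
      simp only [replace_strings_by_proxies]
      rw [pv_indexes_eq, hq]
      simp [PySem.Dict.items]
    rw [hA, pv_B_val line, pv_split_of_no_quote _ hnoq]
    simp only [pvSegRec, PySem.Chars.join_singleton, List.nil_append]
    simp [PySem.Dict.items]
  · exact (pv_A_val line hq hnD).trans (pv_B_val line).symm

theorem replace_strings_by_proxies_changed : Claim_changed_replace_strings_by_proxies := by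
  unfold Claim_changed_replace_strings_by_proxies; decide

-- the output accumulator only ever grows: everything already emitted stays a prefix
theorem pvGo_out_prefix (cs : List Char) : ∀ qs (i : Int) pr (last : Int) out,
    ∃ z, (pvGo cs qs i pr last out).2.2 = out ++ z := by
  intro qs
  induction qs using pv_two_ind with
  | h0 => intro i pr last out; exact ⟨[], by simp [pvGo_nil]⟩
  | h1 q => intro i pr last out; exact ⟨[], by simp [pvGo_one]⟩
  | h2 q0 q1 rest ih =>
    intro i pr last out
    rw [pvGo]
    obtain ⟨z, hz⟩ := ih (i + 2)
      (pr.insert (String.ofList (pvKey i))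
        (String.ofList (PySem.Chars.slice cs (some (q0 : Int)) (some ((q1 : Int) + 1)))))
      ((q1 : Int) + 1)
      (out ++ PySem.Chars.slice cs (some last) (some ((q0 : Int) - 1)) ++ ' ' :: pvKey i)
    exact ⟨PySem.Chars.slice cs (some last) (some ((q0 : Int) - 1)) ++ ' ' :: pvKey i ++ z,
      by rw [hz]; simp⟩

theorem pvSegRec_out_prefix : ∀ segs (i : Int) pr (out : List Char),
    ∃ z, (pvSegRec i pr out segs).2 = out ++ z := by
  intro segs
  induction segs using pv_seg_ind with
  | h0 => intro i pr out; exact ⟨_, rfl⟩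
  | h1 s => intro i pr out; exact ⟨_, rfl⟩
  | h2 s t => intro i pr out; exact ⟨_, rfl⟩
  | h3 s0 s1 t ts ih =>
    intro i pr out
    rw [pvSegRec]
    obtain ⟨z, hz⟩ := ih (i + 2)
      (pr.insert (String.ofList (pvKey i)) (String.ofList ('"' :: s1 ++ ['"'])))
      (out ++ s0.dropLast ++ ' ' :: pvKey i)
    exact ⟨s0.dropLast ++ ' ' :: pvKey i ++ z, by rw [hz]; simp⟩

-- line[0:-1] is the whole line minus its final character: A's wraparound slice
theorem pv_slice_zero_neg_one (cs : List Char) :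
    PySem.List.slice cs (some 0) (some (-1)) = cs.dropLast := by
  simp [PySem.List.slice]
  exact List.dropLast_eq_take.symm

theorem pv_split_two {t : List Char} (h : '"' ∈ t) :
    ∃ s1 t2 ts, pvSplit t [] = s1 :: t2 :: ts := by
  cases hs : pvSplit t [] with
  | nil => exact absurd hs (pv_split_ne_nil t [])
  | cons s1 rest =>
    cases rest with
    | nil =>
      exfalso
      have hj := pv_split_join t []
      rw [hs, PySem.Chars.join_singleton] at hj
      simp at hj
      exact pv_split_no_quote t [] (by simp) s1 (by rw [hs]; simp) (hj ▸ h)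
    | cons t2 ts => exact ⟨s1, t2, ts, rfl⟩

theorem pv_qpos_two {t : List Char} (h : '"' ∈ t) :
    ∃ q1 rest, pvQpos ('"' :: t) 0 = 0 :: q1 :: rest := by
  have h0 : pvQpos ('"' :: t) 0 = 0 :: pvQpos ('"' :: t) 1 := by
    have := pv_qpos_cons (cs := '"' :: t) (p := 0) (s0 := []) (r := t) (by simp) (by simp)
    simpa using this
  obtain ⟨j, hj, he⟩ := List.mem_iff_getElem.mp h
  have hmem : (j + 1) ∈ pvQpos ('"' :: t) 1 := pv_mem_qpos.mpr
    ⟨by omega, by simp; omega, by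
      simp only [List.getElem?_cons_succ]
      simp [List.getElem?_eq_getElem hj, he]⟩
  cases hq1 : pvQpos ('"' :: t) 1 with
  | nil => rw [hq1] at hmem; simp at hmem
  | cons q1 rest => exact ⟨q1, rest, by rw [h0, hq1]⟩

theorem replace_strings_by_proxies_tight : Claim_exact_replace_strings_by_proxies := by
  unfold Claim_exact_replace_strings_by_proxies
  intro line _ hD heq
  obtain ⟨h1, h2⟩ := hD
  obtain ⟨t, hcs⟩ : ∃ t, line.toList = '"' :: t := by
    cases hc : line.toList with
    | nil => rw [hc] at h1; simp at h1
    | cons c t => rw [hc] at h1; simp at h1; exact ⟨t, by rw [h1]⟩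
  rw [hcs] at h2
  simp only [List.tail_cons] at h2
  have ht : t ≠ [] := by intro hh; rw [hh] at h2; simp at h2
  -- A's output string opens with the duplicated '"'
  have headA : (replace_strings_by_proxies line).1.toList.head? = some '"' := by
    obtain ⟨q1, rest, hqp⟩ := pv_qpos_two h2
    simp only [replace_strings_by_proxies]
    rw [hcs, pv_indexes_eq, hqp]
    rw [if_neg (by simp)]
    have hA := pv_A_loop_spec ('"' :: t) (0 :: q1 :: rest) [] ⟨[]⟩ 0 []
    simp only [List.nil_append, List.length_nil, Nat.cast_zero, Nat.zero_add] at hA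
    rw [List.length_map, hA, pvGo]
    have hgen : ∀ (I : Int) (PR : PySem.Dict String String) (L : Int) (T R : List Char),
        (String.ofList ((pvGo ('"' :: t) rest I PR L ('"' :: T)).2.2 ++ R)).toList.head?
          = some '"' := by
      intro I PR L T R
      obtain ⟨z, hz⟩ := pvGo_out_prefix ('"' :: t) rest I PR L ('"' :: T)
      rw [hz]
      simp
    have hsl : PySem.Chars.slice ('"' :: t) (some (0 : Int)) (some (((0 : Nat) : Int) - 1))
        = '"' :: t.dropLast := by
      rw [PySem.Chars.slice_eq_listSlice,
        show (((0 : Nat) : Int) - 1) = (-1 : Int) from by norm_num,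
        pv_slice_zero_neg_one]
      exact List.dropLast_cons_of_ne_nil ht
    rw [hsl]
    simp only [List.nil_append, List.cons_append]
    exact hgen _ _ _ _ _
  -- B's output string opens with the intended space
  have headB : (replace_strings_by_proxies_alt line).1.toList.head? = some ' ' := by
    rw [pv_B_val, hcs]
    have hsp : pvSplit ('"' :: t) [] = [] :: pvSplit t [] := by simp [pvSplit]
    obtain ⟨s1, t2, ts, hsp2⟩ := pv_split_two h2
    rw [hsp, hsp2, pvSegRec]
    have hgen : ∀ (I : Int) (PR : PySem.Dict String String) (T : List Char),
        (String.ofList (pvSegRec I PR (' ' :: T) (t2 :: ts)).2).toList.head? = some ' ' := by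
      intro I PR T
      obtain ⟨z, hz⟩ := pvSegRec_out_prefix (t2 :: ts) I PR (' ' :: T)
      rw [hz]
      simp
    simp only [List.nil_append, List.dropLast_nil, List.cons_append]
    exact hgen _ _ _
  rw [heq, headB] at headA
  simp at headA
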